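-- pv_equiv track=rewrite | github.com/Sosantiart117/SAGE | modulos/calendar/calendar.py | get_dias
-- ===== SOURCE A (Python) =====
-- def get_dias(ao, mes):
--     lista = []
--     if (
--         (mes == 1)
--         or (mes == 3)
--         or (mes == 5)
--         or (mes == 7)
--         or (mes == 8)
--         or (mes == 10)
--         or (mes == 12)
--     ):
--         for dia in range(1, 32):
--             if dia < 10:
--                 lista.append("0" + str(dia))
--             else:
--                 lista.append(str(dia))
--         return lista
--     elif (mes == 4) or (mes == 6) or (mes == 9) or (mes == 11):
--         for dia in range(1, 31):
--             if dia < 10: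
--                 lista.append("0" + str(dia))
--             else:
--                 lista.append(str(dia))
--         return lista
--     elif mes == 2:
--         for dia in range(1, 29):
--             if dia < 10:
--                 lista.append("0" + str(dia))
--             else:
--                 lista.append(str(dia))
--         if (ao % 4) == 0:
--             lista.append(str(29))
--         return lista
-- ===== SOURCE B (Python) =====
-- DAYS = "01020304050607080910111213141516171819202122232425262728293031"
--
-- def get_dias(ao, mes):
--     # Day count by arithmetic (31 minus the alternating-month parity; Feb by the
--     # same %4 rule as A), then slice fixed-width chunks out of one constant string:
--     # no int->str conversion or padding at all.
--     if not (1 <= mes <= 12):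
--         return None
--     if mes == 2:
--         n = 29 if ao % 4 == 0 else 28
--     else:
--         n = 31 - (mes - 1) % 7 % 2
--     return [DAYS[2 * i:2 * i + 2] for i in range(n)]
-- ===== Notes on version B (the rewrite author's own statement) =====
-- stated objective: alternative
-- what changed: Instead of converting and zero-padding each day number in three duplicated loops, B computes the month length by the arithmetic parity formula 31-(mes-1)%7%2 (Feb via the same %4 rule) and slices fixed 2-char chunks out of one precomputed constant string, doing no int-to-string conversion at all.
-- outside the precondition, e.g. on get_dias(2000, 13): A returns None, B returns None
import Mathlib
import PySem

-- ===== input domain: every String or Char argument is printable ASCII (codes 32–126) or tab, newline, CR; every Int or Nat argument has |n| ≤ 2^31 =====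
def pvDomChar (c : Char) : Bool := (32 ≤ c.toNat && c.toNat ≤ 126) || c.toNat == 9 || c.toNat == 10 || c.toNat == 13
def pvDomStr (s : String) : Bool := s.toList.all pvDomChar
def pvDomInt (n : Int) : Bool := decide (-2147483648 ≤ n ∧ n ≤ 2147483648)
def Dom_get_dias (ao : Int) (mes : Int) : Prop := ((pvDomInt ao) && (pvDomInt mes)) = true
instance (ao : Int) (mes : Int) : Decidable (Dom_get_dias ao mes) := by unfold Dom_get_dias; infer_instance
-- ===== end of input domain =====

-- B drops A's three per-branch pad-and-append loops: it computes the month length by the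
-- parity formula 31-(mes-1)%7%2 (Feb via the same %4 rule) and slices fixed 2-char chunks
-- out of one constant string (objective: alternative — no int-to-string conversion at all).

-- ===== PORT A =====
def get_dias (ao : Int) (mes : Int) : List String :=
  let lista : List String := []
  if mes == 1 || mes == 3 || mes == 5 || mes == 7 || mes == 8 || mes == 10 || mes == 12 then
    (PySem.List.pyRange 1 32 1).foldl
      (fun lista dia =>
        if dia < 10 then lista ++ ["0" ++ PySem.Int.toStr dia] else lista ++ [PySem.Int.toStr dia]) lista
  else if mes == 4 || mes == 6 || mes == 9 || mes == 11 then
    (PySem.List.pyRange 1 31 1).foldl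
      (fun lista dia =>
        if dia < 10 then lista ++ ["0" ++ PySem.Int.toStr dia] else lista ++ [PySem.Int.toStr dia]) lista
  else if mes == 2 then
    let lista :=
      (PySem.List.pyRange 1 29 1).foldl
        (fun lista dia =>
          if dia < 10 then lista ++ ["0" ++ PySem.Int.toStr dia] else lista ++ [PySem.Int.toStr dia]) lista
    if PySem.Int.mod ao 4 == 0 then lista ++ [PySem.Int.toStr 29] else lista
  else []  -- Python A falls through and returns None here; excluded by Pre_get_dias

-- ===== PORT B =====
def pvDAYS : String := "01020304050607080910111213141516171819202122232425262728293031"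

def get_dias_alt (ao : Int) (mes : Int) : List String :=
  if ¬ (1 ≤ mes ∧ mes ≤ 12) then []  -- Python B returns None here; excluded by Pre_get_dias
  else
    let n : Int :=
      if mes == 2 then (if PySem.Int.mod ao 4 == 0 then 29 else 28)
      else 31 - PySem.Int.mod (PySem.Int.mod (mes - 1) 7) 2
    (PySem.List.pyRange 0 n 1).map
      (fun i => PySem.Str.slice pvDAYS (some (2 * i)) (some (2 * i + 2)))

-- ===== PRECONDITION & SPEC =====
-- Pre_ excludes months outside 1..12: there Python A (and B) return None, which is not a
-- value of the declared list-of-strings type.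
def Pre_get_dias (ao : Int) (mes : Int) : Prop := 1 ≤ mes ∧ mes ≤ 12
instance (ao : Int) (mes : Int) : Decidable (Pre_get_dias ao mes) := by unfold Pre_get_dias; infer_instance
def pvWitness_get_dias : Int × Int := (2024, 2)
def Spec_get_dias (ao : Int) (mes : Int) (out : List String) : Prop := out = get_dias_alt ao mes
instance (ao : Int) (mes : Int) (out : List String) : Decidable (Spec_get_dias ao mes out) := by unfold Spec_get_dias; infer_instance

-- ===== CLAIM (what is proved, stated in full; the proofs are below) =====
def Claim_equal_get_dias : Prop := ∀ (ao : Int) (mes : Int), Dom_get_dias ao mes → Pre_get_dias ao mes → Spec_get_dias ao mes (get_dias ao mes)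

-- ===== LEMMAS AND PROOFS =====

-- ===== VERDICT (by name: the statement is the Claim_ definition above) =====
theorem get_dias_spec : Claim_equal_get_dias := by
  intro ao mes _ hpre
  unfold Spec_get_dias
  obtain ⟨h1, h2⟩ := hpre
  cases h : (PySem.Int.mod ao 4 == 0) <;>
    interval_cases mes <;> simp only [get_dias, get_dias_alt, h] <;> decide
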